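-- pv_equiv track=rewrite | github.com/sejongmin/Python_study | 백준/Gold/15824. 너 봄에는 캡사이신이 맛있단다/너 봄에는 캡사이신이 맛있단다.py | solution
-- ===== SOURCE A (Python) =====
-- MOD = int(1e9) + 7
--
-- def solution(N, menu):
--     answer = 0
--     menu.sort()
--     pow_cache = [1] * N
--     for i in range(1, N):
--         pow_cache[i] = pow_cache[i - 1] * 2
--
--     for i in range(N):
--         answer += (menu[i] * (pow_cache[i] - pow_cache[N - 1 - i])) % MOD
--
--     return answer % MOD
-- ===== SOURCE B (Python) =====
-- MOD = int(1e9) + 7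
--
-- def solution(N, menu):
--     menu.sort()
--     pow2 = []
--     p = 1
--     for _ in range(N):
--         pow2.append(p)
--         p = p * 2 % MOD
--     total = 0
--     lo, hi = 0, N - 1
--     while lo < hi:
--         total += (menu[hi] - menu[lo]) * (pow2[hi] - pow2[lo])
--         lo += 1
--         hi -= 1
--     return total % MOD
-- ===== Notes on version B (the rewrite author's own statement) =====
-- stated objective: faster
-- what changed: Replaces A's per-index pass over exact (unbounded) powers of two by a two-pointer pass that pairs index i with N-1-i, accumulating (menu[hi]-menu[lo])*(pow2[hi]-pow2[lo]) with powers kept reduced mod 1e9+7, so no huge integers are ever built.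
import Mathlib
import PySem

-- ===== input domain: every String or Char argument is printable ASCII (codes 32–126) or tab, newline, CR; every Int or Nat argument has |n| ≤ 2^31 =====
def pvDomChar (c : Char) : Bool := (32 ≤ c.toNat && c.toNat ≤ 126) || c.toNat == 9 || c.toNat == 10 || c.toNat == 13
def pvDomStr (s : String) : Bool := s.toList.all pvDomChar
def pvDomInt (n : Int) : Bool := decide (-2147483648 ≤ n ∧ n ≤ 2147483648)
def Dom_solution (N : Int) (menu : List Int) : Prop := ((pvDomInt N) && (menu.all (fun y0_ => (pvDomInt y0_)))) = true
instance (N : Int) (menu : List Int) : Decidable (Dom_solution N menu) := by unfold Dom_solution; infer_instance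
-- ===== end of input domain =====

-- B replaces A's per-index pass over exact powers of two by a two-pointer pairing pass with
-- powers reduced mod 1e9+7 (measured faster). Both Pythons sort `menu` in place; the theorems
-- here are about the return value only (the mutation is identical in A and B).

-- ===== PORT A =====
-- `menu[i]` ports as pyGetD with default 0: Python raises IndexError exactly when the index is
-- out of range, and Pre_solution excludes those inputs (N ≤ len(menu)); the `pow_cache` indices
-- are always in range, and nonnegative, so `.toNat` for `List.set` is exact.
def solution (N : Int) (menu : List Int) : Int :=
  let m := PySem.List.sorted menu (fun x => x) false
  let pc := (PySem.List.pyRange 1 N 1).foldl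
      (fun pc i => pc.set i.toNat (PySem.List.pyGetD pc (i - 1) 0 * 2))
      (List.replicate N.toNat 1)
  let answer := (PySem.List.pyRange 0 N 1).foldl
      (fun a i => a + PySem.Int.mod
          (PySem.List.pyGetD m i 0 *
            (PySem.List.pyGetD pc i 0 - PySem.List.pyGetD pc (N - 1 - i) 0)) 1000000007) 0
  PySem.Int.mod answer 1000000007

-- ===== PORT B =====
-- the `while lo < hi` loop of Source B; terminates because hi - lo shrinks
def solutionAltLoop (m p2 : List Int) (lo hi total : Int) : Int :=
  if lo < hi then
    solutionAltLoop m p2 (lo + 1) (hi - 1)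
      (total + (PySem.List.pyGetD m hi 0 - PySem.List.pyGetD m lo 0) *
               (PySem.List.pyGetD p2 hi 0 - PySem.List.pyGetD p2 lo 0))
  else total
termination_by (hi - lo).toNat
decreasing_by omega

def solution_alt (N : Int) (menu : List Int) : Int :=
  let m := PySem.List.sorted menu (fun x => x) false
  let pw := (PySem.List.pyRange 0 N 1).foldl
      (fun (s : List Int × Int) _ => (s.1 ++ [s.2], PySem.Int.mod (s.2 * 2) 1000000007))
      ([], 1)
  PySem.Int.mod (solutionAltLoop m pw.1 0 (N - 1) 0) 1000000007

-- ===== PRECONDITION & SPEC =====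
-- Pre_ excludes exactly the inputs where Python A raises IndexError: menu[i] with N > len(menu).
def Pre_solution (N : Int) (menu : List Int) : Prop := N ≤ (menu.length : Int)
instance (N : Int) (menu : List Int) : Decidable (Pre_solution N menu) := by
  unfold Pre_solution; infer_instance
def pvWitness_solution : Int × List Int := (3, [5, 1, 2])

def Spec_solution (N : Int) (menu : List Int) (out : Int) : Prop := out = solution_alt N menu
instance (N : Int) (menu : List Int) (out : Int) : Decidable (Spec_solution N menu out) := by
  unfold Spec_solution; infer_instance

-- ===== CLAIM (what is proved, stated in full; the proofs are below) =====
def Claim_equal_solution : Prop := ∀ (N : Int) (menu : List Int),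
  Dom_solution N menu → Pre_solution N menu → Spec_solution N menu (solution N menu)

-- ===== LEMMAS AND PROOFS =====

-- invariant of A's pow_cache fill loop: after processing range(1, j), entry k is 2^k for k < j, else still 1
theorem pc_fill (n : Nat) : ∀ (j : Nat), j ≤ n →
    (PySem.List.pyRange 1 (j : Int) 1).foldl
      (fun pc i => pc.set i.toNat (PySem.List.pyGetD pc (i - 1) 0 * 2))
      (List.replicate n 1)
    = (List.range n).map (fun k => if k < j then (2 : Int) ^ k else 1) := by
  intro j
  induction j with
  | zero =>
    intro _
    rw [PySem.List.pyRange_one_eq_nil (by norm_num)]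
    simp
  | succ j ih =>
    intro hj
    by_cases hj0 : j = 0
    · subst hj0
      rw [show (((0 + 1 : Nat)) : Int) = 1 by norm_num, PySem.List.pyRange_one_eq_nil le_rfl]
      simp only [List.foldl_nil]
      have : (fun k => if k < 0 + 1 then (2 : Int) ^ k else 1) = fun _ => (1 : Int) := by
        funext k
        by_cases h : k < 0 + 1
        · have : k = 0 := by omega
          subst this; norm_num
        · rw [if_neg h]
      rw [this]
      simp [List.map_const']
    · have h1j : (1 : Int) ≤ (j : Int) := by omega
      rw [show ((j + 1 : Nat) : Int) = (j : Int) + 1 by push_cast; ring,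
        PySem.List.pyRange_one_succ_right h1j, List.foldl_append, ih (by omega)]
      simp only [List.foldl_cons, List.foldl_nil]
      have hg : PySem.List.pyGetD
          ((List.range n).map (fun k => if k < j then (2 : Int) ^ k else 1)) ((j : Int) - 1) 0
          = (2 : Int) ^ (j - 1) := by
        rw [show ((j : Int) - 1) = ((j - 1 : Nat) : Int) by omega]
        rw [PySem.List.pyGetD_of_nonneg _ _ (by omega)]
        rw [Int.toNat_natCast]
        rw [PySem.List.getD_map_range _ _ _ _ (by omega)]
        rw [if_pos (by omega)]
      rw [hg]
      apply List.ext_getElem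
      · simp
      · intro i h₁ h₂
        simp only [List.getElem_set, List.getElem_map, List.getElem_range, Int.toNat_natCast]
        by_cases hij : j = i
        · subst hij
          rw [if_pos rfl, if_pos (by omega)]
          rw [← pow_succ]
          congr 1
          omega
        · rw [if_neg hij]
          by_cases h : i < j
          · rw [if_pos h, if_pos (by omega)]
          · rw [if_neg h, if_neg (by omega)]

theorem pcA_eq (N : Int) :
    (PySem.List.pyRange 1 N 1).foldl
      (fun pc i => pc.set i.toNat (PySem.List.pyGetD pc (i - 1) 0 * 2))
      (List.replicate N.toNat 1)
    = (List.range N.toNat).map (fun k => (2 : Int) ^ k) := by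
  by_cases h : 0 ≤ N
  · rw [show N = ((N.toNat : Nat) : Int) by omega]
    simp only [Int.toNat_natCast]
    rw [pc_fill N.toNat N.toNat le_rfl]
    apply List.map_congr_left
    intro k hk
    rw [if_pos (List.mem_range.mp hk)]
  · rw [PySem.List.pyRange_one_eq_nil (a := 1) (b := N) (by omega)]
    have h0 : N.toNat = 0 := by omega
    simp [h0]

theorem p2_fill (j : Nat) :
    (PySem.List.pyRange 0 (j : Int) 1).foldl
      (fun (s : List Int × Int) _ => (s.1 ++ [s.2], PySem.Int.mod (s.2 * 2) 1000000007))
      ([], 1)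
    = ((List.range j).map (fun k => PySem.Int.mod ((2 : Int) ^ k) 1000000007),
       PySem.Int.mod ((2 : Int) ^ j) 1000000007) := by
  induction j with
  | zero =>
    rw [show ((0 : Nat) : Int) = 0 by norm_num, PySem.List.pyRange_one_eq_nil le_rfl]
    simp only [List.foldl_nil, List.range_zero, List.map_nil]
    norm_num [PySem.Int.mod_eq_emod_of_pos]
  | succ j ih =>
    rw [show ((j + 1 : Nat) : Int) = (j : Int) + 1 by push_cast; ring,
      PySem.List.pyRange_one_succ_right (by omega), List.foldl_append, ih]
    simp only [List.foldl_cons, List.foldl_nil]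
    rw [List.range_succ]
    simp only [List.map_append, List.map_cons, List.map_nil]
    congr 1
    rw [PySem.Int.mod_eq_emod_of_pos (by norm_num), PySem.Int.mod_eq_emod_of_pos (by norm_num),
      PySem.Int.mod_eq_emod_of_pos (by norm_num), pow_succ, Int.mul_emod ((2:Int)^j) 2]
    norm_num

theorem p2B_eq (N : Int) :
    ((PySem.List.pyRange 0 N 1).foldl
      (fun (s : List Int × Int) _ => (s.1 ++ [s.2], PySem.Int.mod (s.2 * 2) 1000000007))
      ([], 1)).1
    = (List.range N.toNat).map (fun k => PySem.Int.mod ((2 : Int) ^ k) 1000000007) := by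
  by_cases h : 0 ≤ N
  · rw [show N = ((N.toNat : Nat) : Int) by omega, p2_fill]
    simp only [Int.toNat_natCast]
  · rw [PySem.List.pyRange_one_eq_nil (a := 0) (b := N) (by omega)]
    have h0 : N.toNat = 0 := by omega
    simp [h0]

theorem p2_get (N i : Int) (h0 : 0 ≤ i) (hN : i < N) :
    PySem.List.pyGetD
      ((List.range N.toNat).map (fun k => PySem.Int.mod ((2 : Int) ^ k) 1000000007)) i 0
    = PySem.Int.mod ((2 : Int) ^ i.toNat) 1000000007 := by
  rw [PySem.List.pyGetD_of_nonneg _ _ h0, PySem.List.getD_map_range _ _ _ _ (by omega)]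

theorem mod_modeq (a : Int) : Int.ModEq 1000000007 (PySem.Int.mod a 1000000007) a := by
  rw [PySem.Int.mod_eq_emod_of_pos (by norm_num)]
  exact Int.emod_emod_of_dvd a dvd_rfl

theorem loop_modeq (N : Int) (m : List Int) (fuel : Nat) :
    ∀ (lo hi total : Int), lo + hi = N - 1 → 0 ≤ lo → hi < N → (hi - lo).toNat = fuel →
    Int.ModEq 1000000007
      (solutionAltLoop m
        ((List.range N.toNat).map (fun k => PySem.Int.mod ((2 : Int) ^ k) 1000000007))
        lo hi total)
      (total + ((PySem.List.pyRange lo (hi + 1) 1).map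
        (fun i => PySem.List.pyGetD m i 0 *
          ((2 : Int) ^ i.toNat - (2 : Int) ^ (N - 1 - i).toNat))).sum) := by
  induction fuel using Nat.strong_induction_on with
  | _ fuel IH =>
  intro lo hi total hsum hlo hhi hfuel
  rw [solutionAltLoop]
  by_cases h : lo < hi
  · rw [if_pos h]
    rw [p2_get N hi (by omega) hhi, p2_get N lo hlo (by omega)]
    have hmid := IH (hi - 1 - (lo + 1)).toNat (by omega) (lo + 1) (hi - 1)
      (total + (PySem.List.pyGetD m hi 0 - PySem.List.pyGetD m lo 0) *
        (PySem.Int.mod ((2 : Int) ^ hi.toNat) 1000000007 -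
         PySem.Int.mod ((2 : Int) ^ lo.toNat) 1000000007))
      (by omega) (by omega) (by omega) rfl
    rw [show hi - 1 + 1 = hi by ring] at hmid
    refine hmid.trans ?_
    rw [PySem.List.pyRange_one_cons (show lo < hi + 1 by omega),
      PySem.List.pyRange_one_succ_right (show lo + 1 ≤ hi by omega)]
    simp only [List.map_cons, List.map_append, List.sum_cons, List.sum_append,
      List.map_nil, List.sum_nil]
    rw [show N - 1 - lo = hi by omega, show N - 1 - hi = lo by omega]
    have hprod : Int.ModEq 1000000007
        ((PySem.List.pyGetD m hi 0 - PySem.List.pyGetD m lo 0) *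
          (PySem.Int.mod ((2 : Int) ^ hi.toNat) 1000000007 -
           PySem.Int.mod ((2 : Int) ^ lo.toNat) 1000000007))
        ((PySem.List.pyGetD m hi 0 - PySem.List.pyGetD m lo 0) *
          ((2 : Int) ^ hi.toNat - (2 : Int) ^ lo.toNat)) :=
      Int.ModEq.mul_left _ (Int.ModEq.sub (mod_modeq _) (mod_modeq _))
    have hstep := Int.ModEq.add_left total
      (Int.ModEq.add hprod (Int.ModEq.refl (((PySem.List.pyRange (lo + 1) hi 1).map
        (fun i => PySem.List.pyGetD m i 0 *
          ((2 : Int) ^ i.toNat - (2 : Int) ^ (N - 1 - i).toNat))).sum)))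
    have hre : total + ((PySem.List.pyGetD m hi 0 - PySem.List.pyGetD m lo 0) *
          (PySem.Int.mod ((2 : Int) ^ hi.toNat) 1000000007 -
           PySem.Int.mod ((2 : Int) ^ lo.toNat) 1000000007) +
        ((PySem.List.pyRange (lo + 1) hi 1).map
          (fun i => PySem.List.pyGetD m i 0 *
            ((2 : Int) ^ i.toNat - (2 : Int) ^ (N - 1 - i).toNat))).sum)
        = total + (PySem.List.pyGetD m hi 0 - PySem.List.pyGetD m lo 0) *
          (PySem.Int.mod ((2 : Int) ^ hi.toNat) 1000000007 -
           PySem.Int.mod ((2 : Int) ^ lo.toNat) 1000000007) +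
        ((PySem.List.pyRange (lo + 1) hi 1).map
          (fun i => PySem.List.pyGetD m i 0 *
            ((2 : Int) ^ i.toNat - (2 : Int) ^ (N - 1 - i).toNat))).sum := by ring
    have hre2 : total + ((PySem.List.pyGetD m hi 0 - PySem.List.pyGetD m lo 0) *
          ((2 : Int) ^ hi.toNat - (2 : Int) ^ lo.toNat) +
        ((PySem.List.pyRange (lo + 1) hi 1).map
          (fun i => PySem.List.pyGetD m i 0 *
            ((2 : Int) ^ i.toNat - (2 : Int) ^ (N - 1 - i).toNat))).sum)
        = total + (PySem.List.pyGetD m lo 0 * ((2 : Int) ^ lo.toNat - (2 : Int) ^ hi.toNat) +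
          (((PySem.List.pyRange (lo + 1) hi 1).map
            (fun i => PySem.List.pyGetD m i 0 *
              ((2 : Int) ^ i.toNat - (2 : Int) ^ (N - 1 - i).toNat))).sum +
           (PySem.List.pyGetD m hi 0 * ((2 : Int) ^ hi.toNat - (2 : Int) ^ lo.toNat) + 0))) := by
      ring
    rw [hre, hre2] at hstep
    exact hstep
  · rw [if_neg h]
    rcases lt_or_eq_of_le (not_lt.mp h) with hlt | heq
    · rw [PySem.List.pyRange_one_eq_nil (by omega)]
      simp
    · subst heq
      rw [PySem.List.pyRange_one_singleton]
      simp only [List.map_cons, List.map_nil, List.sum_cons, List.sum_nil]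
      rw [show N - 1 - hi = hi by omega]
      simp

-- a sum of per-term mods is congruent to the sum of the terms
theorem sum_map_mod_modeq (l : List Int) (t : Int → Int) :
    Int.ModEq 1000000007 ((l.map (fun i => PySem.Int.mod (t i) 1000000007)).sum)
      ((l.map t).sum) := by
  induction l with
  | nil => rfl
  | cons x xs ih =>
    simp only [List.map_cons, List.sum_cons]
    exact Int.ModEq.add (mod_modeq (t x)) ih

-- ===== VERDICT (by name: the statement is the Claim_ definition above) =====
theorem solution_spec : Claim_equal_solution := by
  intro N menu _ _
  show solution N menu = solution_alt N menu
  unfold solution solution_alt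
  dsimp only []
  rw [pcA_eq, p2B_eq, PySem.List.foldl_add]
  have hA : ((PySem.List.pyRange 0 N 1).map
      (fun i => PySem.Int.mod
        (PySem.List.pyGetD (PySem.List.sorted menu (fun x => x) false) i 0 *
          (PySem.List.pyGetD ((List.range N.toNat).map (fun k => (2 : Int) ^ k)) i 0 -
           PySem.List.pyGetD ((List.range N.toNat).map (fun k => (2 : Int) ^ k)) (N - 1 - i) 0))
        1000000007))
      = ((PySem.List.pyRange 0 N 1).map
      (fun i => PySem.Int.mod
        (PySem.List.pyGetD (PySem.List.sorted menu (fun x => x) false) i 0 *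
          ((2 : Int) ^ i.toNat - (2 : Int) ^ (N - 1 - i).toNat)) 1000000007)) := by
    apply List.map_congr_left
    intro i hi
    obtain ⟨h0, hN⟩ := PySem.List.mem_pyRange_one.mp hi
    rw [PySem.List.pyGetD_of_nonneg ((List.range N.toNat).map (fun k => (2 : Int) ^ k)) 0 h0,
      PySem.List.getD_map_range (fun k => (2 : Int) ^ k) N.toNat i.toNat 0 (by omega),
      PySem.List.pyGetD_of_nonneg ((List.range N.toNat).map (fun k => (2 : Int) ^ k)) 0
        (show (0 : Int) ≤ N - 1 - i by omega),
      PySem.List.getD_map_range (fun k => (2 : Int) ^ k) N.toNat (N - 1 - i).toNat 0 (by omega)]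
  rw [hA]
  have h2 := loop_modeq N (PySem.List.sorted menu (fun x => x) false) (N - 1 - 0).toNat
    0 (N - 1) 0 (by ring) le_rfl (by omega) rfl
  rw [show N - 1 + 1 = N by ring] at h2
  have hfin : Int.ModEq 1000000007
      (0 + ((PySem.List.pyRange 0 N 1).map
        (fun i => PySem.Int.mod
          (PySem.List.pyGetD (PySem.List.sorted menu (fun x => x) false) i 0 *
            ((2 : Int) ^ i.toNat - (2 : Int) ^ (N - 1 - i).toNat)) 1000000007)).sum)
      (solutionAltLoop (PySem.List.sorted menu (fun x => x) false)
        ((List.range N.toNat).map (fun k => PySem.Int.mod ((2 : Int) ^ k) 1000000007))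
        0 (N - 1) 0) := by
    rw [zero_add]
    refine (sum_map_mod_modeq (PySem.List.pyRange 0 N 1) _).trans ?_
    refine Int.ModEq.symm (h2.trans ?_)
    rw [zero_add]
  rw [PySem.Int.mod_eq_emod_of_pos (by norm_num), PySem.Int.mod_eq_emod_of_pos (by norm_num)]
  exact hfin
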